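-- pv_equiv track=rewrite | github.com/kimtaejin3/codetree-TILs | 240703/행복한 수열의 개수/number-of-happy-sequence.py | isHappySequence
-- ===== SOURCE A (Python) =====
-- def isHappySequence(datas,m):
--
--     for i in range(len(datas)):
--         target = datas[i]
--         cnt = 0
--         lastPosition = -1
--         for j in range(len(datas)):
--             if (target == datas[j] and (abs(j-lastPosition) == 1 or lastPosition == -1)):
--                 cnt += 1
--                 lastPosition = j
--             elif target == datas[j]:
--                 cnt = 0
--
--         if cnt >= m:
--             return True
--
--     return False
-- ===== SOURCE B (Python) =====
-- def isHappySequence(datas, m):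
--     # One pass: per value track (count, first index, last index); the value
--     # qualifies if its occurrences form one contiguous block (span == count)
--     # of length >= m; a value split into several blocks counts as 0 (as in A).
--     stats = {}
--     for idx, v in enumerate(datas):
--         if v in stats:
--             c, mn, _ = stats[v]
--             stats[v] = (c + 1, mn, idx)
--         else:
--             stats[v] = (1, idx, idx)
--     for c, mn, mx in stats.values():
--         eff = c if mx - mn + 1 == c else 0
--         if eff >= m:
--             return True
--     return False
-- ===== Notes on version B (the rewrite author's own statement) =====
-- stated objective: faster
-- what changed: Replaced the O(n^2) rescan of the whole list for every element by a single pass building a dict of (count, first index, last index) per value, then testing span==count and count>=m per distinct value.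
import Mathlib
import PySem

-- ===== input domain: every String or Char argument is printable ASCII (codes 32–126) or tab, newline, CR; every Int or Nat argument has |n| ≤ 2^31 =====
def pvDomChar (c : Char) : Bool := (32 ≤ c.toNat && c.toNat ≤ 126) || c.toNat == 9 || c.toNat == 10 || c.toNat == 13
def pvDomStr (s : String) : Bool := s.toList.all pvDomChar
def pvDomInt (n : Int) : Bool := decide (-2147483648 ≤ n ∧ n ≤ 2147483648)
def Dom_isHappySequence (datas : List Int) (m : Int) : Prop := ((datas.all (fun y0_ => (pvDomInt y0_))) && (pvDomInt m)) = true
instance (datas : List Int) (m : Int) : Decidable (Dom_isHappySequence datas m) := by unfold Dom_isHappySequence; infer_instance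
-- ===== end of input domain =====

-- B replaces A's O(n^2) rescan of the list for every element by one pass building a
-- dict of (count, first index, last index) per value, then a per-value contiguity test.

-- ===== PORT A =====
-- A-side helper: the body of A's inner 'for j in range(len(datas))' loop;
-- state = (cnt, lastPosition).
def pvStepA (target : Int) (datas : List Int) (st : Int × Int) (j : Int) : Int × Int :=
  if target = PySem.List.pyGetD datas j 0 ∧ ((j - st.2).natAbs = 1 ∨ st.2 = -1) then
    (st.1 + 1, j)
  else if target = PySem.List.pyGetD datas j 0 then
    (0, st.2)
  else st

def isHappySequence (datas : List Int) (m : Int) : Bool :=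
  -- 'for i in range(len(datas)): … if cnt >= m: return True' = any over the range
  (PySem.List.pyRange 0 (PySem.List.len datas) 1).any (fun i =>
    let target := PySem.List.pyGetD datas i 0
    let st := (PySem.List.pyRange 0 (PySem.List.len datas) 1).foldl
      (pvStepA target datas) (0, -1)
    decide (st.1 ≥ m))

-- ===== PORT B =====
-- B-side helper: one step of B's dict-building loop over enumerate(datas);
-- p = (idx, v), entry = (count, min index, max index).
def pvStepB (d : PySem.Dict Int (Int × Int × Int)) (p : Int × Int) :
    PySem.Dict Int (Int × Int × Int) :=
  match d.get? p.2 with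
  | some (c, mn, _) => d.insert p.2 (c + 1, mn, p.1)
  | none => d.insert p.2 (1, p.1, p.1)

-- B-side helper: the effective count of a dict entry (count if one contiguous block, else 0)
def pvEff (t : Int × Int × Int) : Int := if t.2.2 - t.2.1 + 1 = t.1 then t.1 else 0

def isHappySequence_alt (datas : List Int) (m : Int) : Bool :=
  let stats := (PySem.List.enumerate datas 0).foldl pvStepB PySem.Dict.empty
  stats.values.any (fun t => decide (pvEff t ≥ m))

-- ===== PRECONDITION & SPEC =====
def Spec_isHappySequence (datas : List Int) (m : Int) (out : Bool) : Prop := out = isHappySequence_alt datas m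
instance (datas : List Int) (m : Int) (out : Bool) : Decidable (Spec_isHappySequence datas m out) := by unfold Spec_isHappySequence; infer_instance

-- ===== CLAIM (what is proved, stated in full; the proofs are below) =====
def Claim_equal_isHappySequence : Prop := ∀ (datas : List Int) (m : Int), Dom_isHappySequence datas m → Spec_isHappySequence datas m (isHappySequence datas m)

-- ===== LEMMAS AND PROOFS =====

-- A's inner-loop body, reformulated on the (index, value) pairs of enumerate
def pvStepPair (t : Int) (st : Int × Int) (p : Int × Int) : Int × Int :=
  if t = p.2 ∧ ((p.1 - st.2).natAbs = 1 ∨ st.2 = -1) then (st.1 + 1, p.1)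
  else if t = p.2 then (0, st.2)
  else st

-- the effect of B's dict loop on the single entry of key t
def pvUpdB (t : Int) (s : Option (Int × Int × Int)) (p : Int × Int) :
    Option (Int × Int × Int) :=
  if p.2 = t then
    some (match s with
      | some (c, mn, _) => (c + 1, mn, p.1)
      | none => (1, p.1, p.1))
  else s

-- A's final inner-loop count for a given target value
def pvCntA (datas : List Int) (t : Int) : Int :=
  ((PySem.List.enumerate datas 0).foldl (pvStepPair t) (0, -1)).1

-- simulation invariant between A's inner-loop state and B's dict entry,
-- after processing the prefix of indices < s
def pvRel (s : Int) (st : Int × Int) (o : Option (Int × Int × Int)) : Prop :=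
  (o = none ∧ st = (0, -1)) ∨
  (∃ c mn mx, o = some (c, mn, mx) ∧ 0 ≤ mn ∧ mn ≤ mx ∧ mx ≤ s - 1 ∧
    ((mx - mn + 1 = c ∧ st = (c, mx)) ∨
     (mx - mn + 1 > c ∧ st.1 = 0 ∧ 0 ≤ st.2 ∧ st.2 ≤ s - 2)))

lemma pvInnerA_eq (t : Int) (datas : List Int) (st : Int × Int) :
    (PySem.List.pyRange 0 (PySem.List.len datas) 1).foldl (pvStepA t datas) st
      = (PySem.List.enumerate datas 0).foldl (pvStepPair t) st := by
  rw [PySem.List.enumerate_eq_map_pyRange datas 0, List.foldl_map]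
  rfl

lemma pvOuterA_eq (datas : List Int) (q : Int → Bool) :
    (PySem.List.pyRange 0 (PySem.List.len datas) 1).any
        (fun i => q (PySem.List.pyGetD datas i 0)) = datas.any q := by
  conv_rhs => rw [← PySem.List.map_snd_enumerate datas 0]
  rw [PySem.List.enumerate_eq_map_pyRange datas 0, List.map_map, List.any_map]
  rfl

lemma pvA_normal (datas : List Int) (m : Int) :
    isHappySequence datas m = datas.any (fun t => decide (pvCntA datas t ≥ m)) := by
  unfold isHappySequence
  simp only [pvInnerA_eq]
  exact pvOuterA_eq datas (fun t => decide (pvCntA datas t ≥ m))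

lemma pvStepB_get? (d : PySem.Dict Int (Int × Int × Int)) (p : Int × Int) (t : Int) :
    (pvStepB d p).get? t = pvUpdB t (d.get? t) p := by
  unfold pvStepB pvUpdB
  by_cases h : p.2 = t
  · subst h
    cases d.get? p.2 with
    | none => simp
    | some v => obtain ⟨c, mn, mx⟩ := v; simp
  · have h' : t ≠ p.2 := fun hh => h hh.symm
    cases hg : d.get? p.2 with
    | none => rw [if_neg h, PySem.Dict.get?_insert, if_neg h']
    | some v => obtain ⟨c, mn, mx⟩ := v; rw [if_neg h, PySem.Dict.get?_insert, if_neg h']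

lemma pvFoldB_get? (t : Int) (l : List (Int × Int)) :
    ∀ (d : PySem.Dict Int (Int × Int × Int)),
    (l.foldl pvStepB d).get? t = l.foldl (pvUpdB t) (d.get? t) := by
  induction l with
  | nil => intro d; rfl
  | cons p l ih => intro d; simp only [List.foldl_cons, ih, pvStepB_get?]

lemma pvRel_step (t x s : Int) (st : Int × Int) (o : Option (Int × Int × Int))
    (hs : 0 ≤ s) (h : pvRel s st o) :
    pvRel (s + 1) (pvStepPair t st (s, x)) (pvUpdB t o (s, x)) := by
  obtain ⟨cnt, lp⟩ := st
  unfold pvRel at h ⊢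
  unfold pvStepPair pvUpdB
  simp only []
  by_cases hx : x = t
  · subst hx
    rw [if_pos rfl]
    rcases h with ⟨ho, hst⟩ | ⟨c, mn, mx, ho, h0, h1, h2, hgb⟩
    · subst ho
      simp only [Prod.mk.injEq] at hst
      rw [if_pos ⟨rfl, Or.inr (by omega)⟩]
      exact Or.inr ⟨1, s, s, rfl, hs, le_refl _, by omega,
        Or.inl ⟨by omega, by rw [Prod.mk.injEq]; exact ⟨by omega, rfl⟩⟩⟩
    · subst ho
      rcases hgb with ⟨hspan, hst⟩ | ⟨hspan, hc0, hl0, hl2⟩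
      · simp only [Prod.mk.injEq] at hst
        by_cases hadj : mx = s - 1
        · rw [if_pos ⟨rfl, Or.inl (by omega)⟩]
          exact Or.inr ⟨c + 1, mn, s, rfl, h0, by omega, by omega,
            Or.inl ⟨by omega, by rw [Prod.mk.injEq]; exact ⟨by omega, rfl⟩⟩⟩
        · rw [if_neg (by rintro ⟨-, habs | hneg⟩ <;> omega), if_pos rfl]
          exact Or.inr ⟨c + 1, mn, s, rfl, h0, by omega, by omega,
            Or.inr ⟨by omega, rfl, by omega, by omega⟩⟩
      · simp only [] at hc0 hl0 hl2
        rw [if_neg (by rintro ⟨-, habs | hneg⟩ <;> omega), if_pos rfl]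
        exact Or.inr ⟨c + 1, mn, s, rfl, h0, by omega, by omega,
          Or.inr ⟨by omega, rfl, by omega, by omega⟩⟩
  · have hx' : ¬ (t = x) := fun hh => hx hh.symm
    rw [if_neg hx, if_neg (by rintro ⟨hh, -⟩; exact hx' hh), if_neg hx']
    rcases h with ⟨ho, hst⟩ | ⟨c, mn, mx, ho, h0, h1, h2, hgb⟩
    · exact Or.inl ⟨ho, hst⟩
    · refine Or.inr ⟨c, mn, mx, ho, h0, h1, by omega, ?_⟩
      rcases hgb with ⟨hspan, hst⟩ | ⟨hspan, hc0, hl0, hl2⟩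
      · exact Or.inl ⟨hspan, hst⟩
      · exact Or.inr ⟨hspan, hc0, hl0, by omega⟩

lemma pvRel_fold (t : Int) (xs : List Int) :
    ∀ (s : Int) (st : Int × Int) (o : Option (Int × Int × Int)), 0 ≤ s → pvRel s st o →
    pvRel (s + xs.length) ((PySem.List.enumerate xs s).foldl (pvStepPair t) st)
      ((PySem.List.enumerate xs s).foldl (pvUpdB t) o) := by
  induction xs with
  | nil => intro s st o _ h; simpa using h
  | cons y ys ih =>
    intro s st o hs h
    rw [PySem.List.enumerate_cons]
    simp only [List.foldl_cons, List.length_cons]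
    have hrec := ih (s + 1) (pvStepPair t st (s, y)) (pvUpdB t o (s, y)) (by omega)
      (pvRel_step t y s st o hs h)
    have harith : s + (ys.length + 1 : Nat) = (s + 1) + (ys.length : Int) := by
      push_cast; ring
    rw [harith]
    exact hrec

-- the final correspondence: A's count for t = effective count of B's dict entry for t
lemma pvCntA_eq_eff (datas : List Int) (t : Int) :
    ∀ v, ((PySem.List.enumerate datas 0).foldl pvStepB PySem.Dict.empty).get? t = some v →
      pvCntA datas t = pvEff v := by
  intro v hv
  have h0 : pvRel 0 (0, -1) (none : Option (Int × Int × Int)) := Or.inl ⟨rfl, rfl⟩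
  have hrel := pvRel_fold t datas 0 (0, -1) none (le_refl 0) h0
  rw [pvFoldB_get? t (PySem.List.enumerate datas 0) PySem.Dict.empty,
    PySem.Dict.get?_empty] at hv
  rw [hv] at hrel
  obtain ⟨c, mn, mx⟩ := v
  unfold pvCntA
  show _ = pvEff (c, mn, mx)
  have heff : pvEff (c, mn, mx) = if mx - mn + 1 = c then c else 0 := rfl
  rw [heff]
  rcases hrel with ⟨ho, -⟩ | ⟨c', mn', mx', ho, h0', h1, h2, hgb⟩
  · exact absurd ho (by simp)
  · obtain ⟨rfl, rfl, rfl⟩ : c = c' ∧ mn = mn' ∧ mx = mx' := by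
      simpa [Prod.mk.injEq] using ho
    rcases hgb with ⟨hspan, hst⟩ | ⟨hspan, hc0, -, -⟩
    · rw [hst, if_pos hspan]
    · rw [hc0, if_neg (by omega)]

-- B's new-value helper, to put pvStepB into insert-normal form
def pvNewVal (d : PySem.Dict Int (Int × Int × Int)) (p : Int × Int) : Int × Int × Int :=
  match d.get? p.2 with
  | some (c, mn, _) => (c + 1, mn, p.1)
  | none => (1, p.1, p.1)

lemma pvStepB_eq : pvStepB = fun d p => d.insert p.2 (pvNewVal d p) := by
  funext d p
  unfold pvStepB pvNewVal
  cases h : d.get? p.2 with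
  | none => simp
  | some v => obtain ⟨c, mn, mx⟩ := v; simp

lemma pvKeys_stats (datas : List Int) :
    ((PySem.List.enumerate datas 0).foldl pvStepB PySem.Dict.empty).keys
      = PySem.Set.update (PySem.Dict.empty : PySem.Dict Int (Int × Int × Int)).keys
          ((PySem.List.enumerate datas 0).map (·.2)) := by
  rw [pvStepB_eq]
  exact PySem.Dict.keys_foldl_insert_key _ _ _ _

lemma pvMem_keys_iff (datas : List Int) (t : Int) :
    t ∈ ((PySem.List.enumerate datas 0).foldl pvStepB PySem.Dict.empty).keys ↔ t ∈ datas := by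
  rw [pvKeys_stats, PySem.Set.mem_update, PySem.List.map_snd_enumerate]
  simp [PySem.Dict.keys_empty]

lemma pvNodup_keys (datas : List Int) :
    ((PySem.List.enumerate datas 0).foldl pvStepB PySem.Dict.empty).keys.Nodup := by
  rw [pvStepB_eq]
  exact PySem.Dict.nodup_keys_foldl_insert_key _ _ _ _ PySem.Dict.nodup_keys_empty

lemma pvB_normal (datas : List Int) (m : Int) :
    isHappySequence_alt datas m
      = ((PySem.List.enumerate datas 0).foldl pvStepB PySem.Dict.empty).items.any
          (fun p => decide (pvEff p.2 ≥ m)) := by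
  unfold isHappySequence_alt
  simp only [PySem.Dict.values, List.any_map]
  rfl

-- ===== VERDICT (by name: the statement is the Claim_ definition above) =====
theorem isHappySequence_spec : Claim_equal_isHappySequence := by
  intro datas m _
  unfold Spec_isHappySequence
  rw [pvA_normal, pvB_normal]
  rw [Bool.eq_iff_iff, List.any_eq_true, List.any_eq_true]
  constructor
  · rintro ⟨t, ht, hdec⟩
    have hm : pvCntA datas t ≥ m := of_decide_eq_true hdec
    obtain ⟨v, hv⟩ : ∃ v,
        ((PySem.List.enumerate datas 0).foldl pvStepB PySem.Dict.empty).get? t = some v := by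
      rcases hg : ((PySem.List.enumerate datas 0).foldl pvStepB PySem.Dict.empty).get? t with _ | v
      · exact absurd ((pvMem_keys_iff datas t).mpr ht)
          ((PySem.Dict.get?_eq_none_iff_not_mem_keys _ _).mp hg)
      · exact ⟨v, rfl⟩
    refine ⟨(t, v), PySem.Dict.mem_items_of_get?_eq_some _ hv, ?_⟩
    have := pvCntA_eq_eff datas t v hv
    refine decide_eq_true ?_
    show pvEff v ≥ m
    omega
  · rintro ⟨⟨k, v⟩, hp, hdec⟩
    have hm : pvEff v ≥ m := of_decide_eq_true hdec
    have hget : ((PySem.List.enumerate datas 0).foldl pvStepB PySem.Dict.empty).get? k = some v :=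
      (PySem.Dict.get?_eq_some_iff_mem_items _ _ _ (pvNodup_keys datas)).mpr hp
    have hk : k ∈ datas := (pvMem_keys_iff datas k).mp
      (PySem.Dict.mem_keys_of_mem_items _ hp)
    have := pvCntA_eq_eff datas k v hget
    exact ⟨k, hk, decide_eq_true (by omega)⟩
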